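-- pv_equiv track=rewrite | github.com/menelly/adaptive_interpreter | hotspot_disagreement_analyzer.py | find_hotspots
-- ===== SOURCE A (Python) =====
-- from typing import Dict, List, Tuple, Optional
--
-- def find_hotspots(gene_variants: Dict, proximity_threshold: int = 10) -> Dict:
--     """Find hotspot clusters within proximity threshold"""
--     hotspots = {}
--
--     for gene, variants in gene_variants.items():
--         if len(variants) < 2:
--             continue
--
--         clusters = []
--         current_cluster = [variants[0]]
--
--         for i in range(1, len(variants)):
--             current_pos = variants[i]['position']
--             last_pos = current_cluster[-1]['position']
--
--             if current_pos - last_pos <= proximity_threshold: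
--                 current_cluster.append(variants[i])
--             else:
--                 if len(current_cluster) >= 2:
--                     clusters.append(current_cluster)
--                 current_cluster = [variants[i]]
--
--         # Don't forget the last cluster
--         if len(current_cluster) >= 2:
--             clusters.append(current_cluster)
--
--         if clusters:
--             hotspots[gene] = clusters
--
--     return hotspots
-- ===== SOURCE B (Python) =====
-- def _split_run(prev_pos, variants, threshold):
--     """Longest prefix of variants chained to prev_pos; returns (run, rest)."""
--     if variants and variants[0]['position'] - prev_pos <= threshold:
--         run, rest = _split_run(variants[0]['position'], variants[1:], threshold)
--         return [variants[0]] + run, rest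
--     return [], variants
--
--
-- def _segments(variants, threshold):
--     """Split variants into maximal runs of adjacent positions within threshold."""
--     if not variants:
--         return []
--     run, rest = _split_run(variants[0]['position'], variants[1:], threshold)
--     return [[variants[0]] + run] + _segments(rest, threshold)
--
--
-- def find_hotspots(gene_variants, proximity_threshold=10):
--     """Find hotspot clusters within proximity threshold"""
--     hotspots = {}
--     for gene, variants in gene_variants.items():
--         if len(variants) < 2:
--             continue
--         clusters = [seg for seg in _segments(variants, proximity_threshold) if len(seg) >= 2]
--         if clusters:
--             hotspots[gene] = clusters
--     return hotspots
-- ===== Notes on version B (the rewrite author's own statement) =====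
-- stated objective: alternative
-- what changed: Replaces A's single stateful accumulator loop (cluster list + current cluster, flushed on gaps) by a recursive decomposition: split the variant list into maximal adjacent-within-threshold runs by structural recursion (a take-run helper), then filter runs of length >= 2 afterwards.
import Mathlib
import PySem

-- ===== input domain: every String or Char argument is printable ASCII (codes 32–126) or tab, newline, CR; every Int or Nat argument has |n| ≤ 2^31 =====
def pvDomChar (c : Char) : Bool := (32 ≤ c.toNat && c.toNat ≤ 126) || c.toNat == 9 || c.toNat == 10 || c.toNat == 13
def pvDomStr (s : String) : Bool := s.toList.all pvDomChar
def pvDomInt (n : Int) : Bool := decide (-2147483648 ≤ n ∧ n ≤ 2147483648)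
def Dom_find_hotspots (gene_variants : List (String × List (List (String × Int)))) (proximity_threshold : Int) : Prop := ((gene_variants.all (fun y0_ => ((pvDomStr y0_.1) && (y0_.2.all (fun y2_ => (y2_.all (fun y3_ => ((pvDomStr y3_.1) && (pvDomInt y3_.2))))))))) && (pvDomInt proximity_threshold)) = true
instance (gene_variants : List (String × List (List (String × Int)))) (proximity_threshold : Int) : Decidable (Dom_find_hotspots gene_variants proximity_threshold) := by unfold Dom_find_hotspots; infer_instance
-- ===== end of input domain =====

-- B replaces A's stateful accumulator loop by recursive run-splitting plus an after-the-fact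
-- length filter (alternative decomposition, same cost); equivalence of the return value is proved.


-- ===== PORT A =====
-- v['position']; the missing-key KeyError is excluded by Pre_, so the default 0 is never read there
def pyPos (v : List (String × Int)) : Int := (PySem.Dict.mk v).getD "position" 0

-- the body of A's inner 'for i in range(1, len(variants))' loop, applied to variants[i]
def stepA (t : Int) (st : List (List (List (String × Int))) × List (List (String × Int)))
    (v : List (String × Int)) : List (List (List (String × Int))) × List (List (String × Int)) :=
  let current_pos := pyPos v
  let last_pos := pyPos (PySem.List.pyGetD st.2 (-1) [])   -- current_cluster[-1]['position']
  if current_pos - last_pos ≤ t then (st.1, st.2 ++ [v])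
  else if 2 ≤ st.2.length then (st.1 ++ [st.2], [v])
  else (st.1, [v])

def find_hotspots (gene_variants : List (String × List (List (String × Int)))) (proximity_threshold : Int) : List (String × List (List (List (String × Int)))) :=
  (gene_variants.foldl (fun hotspots gv =>
      let variants := gv.2
      if variants.length < 2 then hotspots
      else
        let st := (PySem.List.pyRange 1 (variants.length : Int) 1).foldl
          (fun st i => stepA proximity_threshold st (PySem.List.pyGetD variants i []))
          (([] : List (List (List (String × Int)))), [PySem.List.pyGetD variants 0 []])
        let clusters := if 2 ≤ st.2.length then st.1 ++ [st.2] else st.1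
        if clusters.isEmpty then hotspots else PySem.Dict.insert hotspots gv.1 clusters)
    PySem.Dict.empty).items

-- ===== PORT B =====
-- _split_run: longest prefix of variants chained to prev_pos, plus the remainder
def bSplitRun (threshold prev_pos : Int) :
    List (List (String × Int)) → List (List (String × Int)) × List (List (String × Int))
  | [] => ([], [])
  | v :: rest =>
    if pyPos v - prev_pos ≤ threshold then
      let p := bSplitRun threshold (pyPos v) rest
      (v :: p.1, p.2)
    else ([], v :: rest)

theorem bSplitRun_rest_length (threshold prev_pos : Int) :
    ∀ l : List (List (String × Int)), (bSplitRun threshold prev_pos l).2.length ≤ l.length := by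
  intro l
  induction l generalizing prev_pos with
  | nil => simp [bSplitRun]
  | cons v rest ih =>
    simp only [bSplitRun]
    split
    · exact le_trans (ih (pyPos v)) (Nat.le_succ _)
    · simp

-- _segments: maximal runs of adjacent positions within threshold
def bSegments (threshold : Int) :
    List (List (String × Int)) → List (List (List (String × Int)))
  | [] => []
  | v :: rest =>
    let p := bSplitRun threshold (pyPos v) rest
    (v :: p.1) :: bSegments threshold p.2
termination_by l => l.length
decreasing_by
  exact Nat.lt_succ_of_le (bSplitRun_rest_length threshold (pyPos v) rest)

def find_hotspots_alt (gene_variants : List (String × List (List (String × Int)))) (proximity_threshold : Int) : List (String × List (List (List (String × Int)))) :=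
  (gene_variants.foldl (fun hotspots gv =>
      if gv.2.length < 2 then hotspots
      else
        let clusters := (bSegments proximity_threshold gv.2).filter (fun seg => 2 ≤ seg.length)
        if clusters.isEmpty then hotspots else PySem.Dict.insert hotspots gv.1 clusters)
    PySem.Dict.empty).items

-- ===== PRECONDITION & SPEC =====
-- Pre_ excludes exactly the inputs where Python A raises KeyError: a gene with at least two
-- variants one of which has no "position" key (A reads 'position' of every variant of such a gene).
def Pre_find_hotspots (gene_variants : List (String × List (List (String × Int)))) (proximity_threshold : Int) : Prop :=
  ∀ p ∈ gene_variants, 2 ≤ p.2.length → ∀ v ∈ p.2, (PySem.Dict.mk v).contains "position" = true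
instance (gene_variants : List (String × List (List (String × Int)))) (proximity_threshold : Int) : Decidable (Pre_find_hotspots gene_variants proximity_threshold) := by unfold Pre_find_hotspots; infer_instance
def pvWitness_find_hotspots : (List (String × List (List (String × Int)))) × Int :=
  ([("geneA", [[("position", 3)], [("position", 7)], [("position", 30)]]), ("geneB", [[("position", 1)]])], 10)

def Spec_find_hotspots (gene_variants : List (String × List (List (String × Int)))) (proximity_threshold : Int) (out : List (String × List (List (List (String × Int))))) : Prop := out = find_hotspots_alt gene_variants proximity_threshold
instance (gene_variants : List (String × List (List (String × Int)))) (proximity_threshold : Int) (out : List (String × List (List (List (String × Int))))) : Decidable (Spec_find_hotspots gene_variants proximity_threshold out) := by unfold Spec_find_hotspots; infer_instance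

-- ===== CLAIM (what is proved, stated in full; the proofs are below) =====
def Claim_equal_find_hotspots : Prop := ∀ (gene_variants : List (String × List (List (String × Int)))) (proximity_threshold : Int), Dom_find_hotspots gene_variants proximity_threshold → Pre_find_hotspots gene_variants proximity_threshold → Spec_find_hotspots gene_variants proximity_threshold (find_hotspots gene_variants proximity_threshold)

-- ===== LEMMAS AND PROOFS =====

-- A's loop state (clusters, current_cluster), folded over the remaining variants and finalized,
-- equals the already-flushed clusters plus B's runs (current run seeded by cur) filtered by length.
theorem foldA_eq_segments (t : Int) :
    ∀ (rest : List (List (String × Int)))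
      (clusters : List (List (List (String × Int)))) (cur : List (List (String × Int))),
      (let st := rest.foldl (stepA t) (clusters, cur)
       if 2 ≤ st.2.length then st.1 ++ [st.2] else st.1)
      = clusters ++
        ((let p := bSplitRun t (pyPos (PySem.List.pyGetD cur (-1) [])) rest
          (cur ++ p.1) :: bSegments t p.2).filter (fun seg => 2 ≤ seg.length)) := by
  intro rest
  induction rest with
  | nil =>
    intro clusters cur
    simp only [List.foldl_nil, bSplitRun, bSegments, List.append_nil, List.filter]
    split_ifs with h <;> simp [h]
  | cons v rest ih =>
    intro clusters cur
    simp only [List.foldl_cons, stepA, bSplitRun]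
    by_cases h : pyPos v - pyPos (PySem.List.pyGetD cur (-1) []) ≤ t
    · simp only [h, if_true]
      have := ih clusters (cur ++ [v])
      simp only [PySem.List.pyGetD_neg_one_append_singleton] at this
      rw [this]
      simp
    · simp only [h, if_false]
      have hv : PySem.List.pyGetD [v] (-1) ([] : List (String × Int)) = v := by
        have : ([v] : List (List (String × Int))) = [] ++ [v] := rfl
        rw [this, PySem.List.pyGetD_neg_one_append_singleton]
      by_cases h2 : 2 ≤ cur.length
      · simp only [h2, if_true]
        have := ih (clusters ++ [cur]) [v]
        rw [hv] at this
        rw [this]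
        simp [bSegments, List.filter, h2]
      · simp only [h2, if_false]
        have := ih clusters [v]
        rw [hv] at this
        rw [this]
        simp [bSegments, List.filter, h2]

-- per gene: A's clusters equal B's filtered segments (for a nonempty variant list)
theorem clusters_eq (t : Int) (v : List (String × Int)) (rest : List (List (String × Int))) :
    (let st := (PySem.List.pyRange 1 ((v :: rest).length : Int) 1).foldl
        (fun st i => stepA t st (PySem.List.pyGetD (v :: rest) i []))
        (([] : List (List (List (String × Int)))), [PySem.List.pyGetD (v :: rest) 0 []])
     if 2 ≤ st.2.length then st.1 ++ [st.2] else st.1)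
    = (bSegments t (v :: rest)).filter (fun seg => 2 ≤ seg.length) := by
  have hfold := PySem.List.foldl_pyRange_pyGetD' (xs := v :: rest) (a := 1)
    (d := ([] : List (String × Int))) (f := stepA t)
    (init := (([] : List (List (List (String × Int)))), [PySem.List.pyGetD (v :: rest) 0 []]))
    (by norm_num)
  simp only [hfold]
  have h0 : PySem.List.pyGetD (v :: rest) 0 ([] : List (String × Int)) = v := by
    simp [PySem.List.pyGetD_zero_cons]
  have hdrop : (v :: rest).drop (1 : Int).toNat = rest := by simp
  rw [h0, hdrop]
  have := foldA_eq_segments t rest [] [v]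
  have hv : PySem.List.pyGetD [v] (-1) ([] : List (String × Int)) = v := by
    have : ([v] : List (List (String × Int))) = [] ++ [v] := rfl
    rw [this, PySem.List.pyGetD_neg_one_append_singleton]
  rw [hv] at this
  rw [this]
  simp [bSegments]

-- ===== VERDICT (by name: the statement is the Claim_ definition above) =====
theorem find_hotspots_spec : Claim_equal_find_hotspots := by
  intro gene_variants proximity_threshold _hDom _hPre
  unfold Spec_find_hotspots find_hotspots find_hotspots_alt
  congr 1
  apply PySem.List.foldl_congr_mem
  intro acc gv _hmem
  by_cases hlen : gv.2.length < 2
  · simp [hlen]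
  · simp only [hlen, if_false]
    obtain ⟨v, rest, hvr⟩ : ∃ v rest, gv.2 = v :: rest := by
      cases hgv : gv.2 with
      | nil => rw [hgv] at hlen; simp at hlen
      | cons a b => exact ⟨a, b, rfl⟩
    rw [hvr]
    rw [clusters_eq proximity_threshold v rest]
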